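-- pv_equiv track=rewrite | github.com/YashB63/GFG-Daily-Questions | Day 471/Distinct Difference/distinct_difference.py | getDistinctDifference
-- ===== SOURCE A (Python) =====
-- from typing import List
--
-- def getDistinctDifference(N : int, A : List[int]) -> List[int]:
--     p,s=[0]*N,[0]*N
--     ans=[0]*N
--     up,us=set(),set()
--     for i in range(N):
--         p[i]=len(up)
--         up.add(A[i])
--     for i in range(N-1,-1,-1):
--         s[i]=len(us)
--         us.add(A[i])
--     for i in range(N):
--         ans[i]=p[i]-s[i]
--     return ans
-- ===== SOURCE B (Python) =====
-- from typing import List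
--
-- def getDistinctDifference(N: int, A: List[int]) -> List[int]:
--     # Each position's answer directly: distinct count of the prefix A[:i]
--     # minus distinct count of the suffix A[i+1:N].
--     return [len(set(A[:i])) - len(set(A[i+1:N])) for i in range(N)]
-- ===== Notes on version B (the rewrite author's own statement) =====
-- stated objective: simpler
-- what changed: Replaced the three sequential loops with incrementally maintained prefix/suffix sets by a single list comprehension that computes each answer directly as len(set(A[:i])) - len(set(A[i+1:N])).
import Mathlib
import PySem

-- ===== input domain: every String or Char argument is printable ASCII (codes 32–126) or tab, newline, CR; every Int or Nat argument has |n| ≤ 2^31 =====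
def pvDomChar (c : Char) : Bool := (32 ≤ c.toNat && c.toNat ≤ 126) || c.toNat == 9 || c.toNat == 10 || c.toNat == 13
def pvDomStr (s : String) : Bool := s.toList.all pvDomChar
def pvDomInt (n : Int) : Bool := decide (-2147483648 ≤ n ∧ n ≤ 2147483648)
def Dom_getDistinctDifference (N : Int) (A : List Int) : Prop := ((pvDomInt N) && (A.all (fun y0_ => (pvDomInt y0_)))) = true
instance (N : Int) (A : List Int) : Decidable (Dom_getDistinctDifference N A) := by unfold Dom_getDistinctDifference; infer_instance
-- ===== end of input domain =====

-- B replaces A's three sequential loops (incremental prefix/suffix sets, then a combining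
-- pass) by a single comprehension computing each entry directly from two slices; objective: simpler.

-- ===== PORT A =====
-- literal transliteration of A: three loops over preallocated lists, two incremental sets
def getDistinctDifference (N : Int) (A : List Int) : List Int :=
  let p0 : List Int := List.replicate N.toNat 0
  let s0 : List Int := List.replicate N.toNat 0
  let ans0 : List Int := List.replicate N.toNat 0
  let fwd := (PySem.List.pyRange 0 N 1).foldl
      (fun (st : List Int × PySem.Set Int) i =>
        (st.1.set i.toNat (PySem.Set.len st.2), PySem.Set.add st.2 (PySem.List.pyGetD A i 0)))
      (p0, PySem.Set.empty)
  let bwd := (PySem.List.pyRange (N - 1) (-1) (-1)).foldl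
      (fun (st : List Int × PySem.Set Int) i =>
        (st.1.set i.toNat (PySem.Set.len st.2), PySem.Set.add st.2 (PySem.List.pyGetD A i 0)))
      (s0, PySem.Set.empty)
  (PySem.List.pyRange 0 N 1).foldl
      (fun (a : List Int) i =>
        a.set i.toNat (PySem.List.pyGetD fwd.1 i 0 - PySem.List.pyGetD bwd.1 i 0))
      ans0

-- ===== PORT B =====
def getDistinctDifference_alt (N : Int) (A : List Int) : List Int :=
  (PySem.List.pyRange 0 N 1).map (fun i =>
    PySem.Set.len (PySem.Set.ofList (PySem.List.slice A none (some i)))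
    - PySem.Set.len (PySem.Set.ofList (PySem.List.slice A (some (i + 1)) (some N))))

-- ===== PRECONDITION & SPEC =====
-- Pre_ excludes exactly the inputs where A raises IndexError: N larger than len(A).
def Pre_getDistinctDifference (N : Int) (A : List Int) : Prop := N ≤ (A.length : Int)
instance (N : Int) (A : List Int) : Decidable (Pre_getDistinctDifference N A) := by
  unfold Pre_getDistinctDifference; infer_instance

def pvWitness_getDistinctDifference : Int × List Int := (4, [1, 2, 1, 3])

def Spec_getDistinctDifference (N : Int) (A : List Int) (out : List Int) : Prop := out = getDistinctDifference_alt N A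
instance (N : Int) (A : List Int) (out : List Int) : Decidable (Spec_getDistinctDifference N A out) := by unfold Spec_getDistinctDifference; infer_instance

-- ===== CLAIM (what is proved, stated in full; the proofs are below) =====
def Claim_equal_getDistinctDifference : Prop := ∀ (N : Int) (A : List Int), Dom_getDistinctDifference N A → Pre_getDistinctDifference N A → Spec_getDistinctDifference N A (getDistinctDifference N A)

-- ===== LEMMAS AND PROOFS =====

-- distinct-count (as Int) of a list, the value both programs compute per index
def pvDC (l : List Int) : Int := PySem.Set.len (PySem.Set.ofList l)

-- distinct count ignores the order of the list
theorem pvDC_congr (l₁ l₂ : List Int) (h : ∀ x, x ∈ l₁ ↔ x ∈ l₂) : pvDC l₁ = pvDC l₂ := by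
  unfold pvDC PySem.Set.len
  have : (PySem.Set.ofList l₁).Perm (PySem.Set.ofList l₂) := by
    rw [List.perm_ext_iff_of_nodup (PySem.Set.nodup_ofList l₁) (PySem.Set.nodup_ofList l₂)]
    intro a; simp [PySem.Set.mem_ofList, h a]
  exact_mod_cast this.length_eq

-- the backward range of A's second loop is the reversed forward range
theorem pvRevRange (n : Nat) :
    PySem.List.pyRange ((n : Int) - 1) (-1) (-1)
      = ((List.range n).map (fun k => (Nat.cast k : Int))).reverse := by
  induction n with
  | zero => decide
  | succ n ih =>
      have h : (-1 : Int) < ((n + 1 : Nat) : Int) - 1 := by push_cast; omega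
      rw [PySem.List.pyRange_neg_one_cons h]
      have : ((n + 1 : Nat) : Int) - 1 - 1 = (n : Int) - 1 := by push_cast; ring
      rw [show ((n + 1 : Nat) : Int) - 1 = (n : Int) by push_cast; ring, this] at *
      rw [ih, List.range_succ]
      simp

-- A's first loop: p becomes the prefix distinct counts, up the set of the first n elements
theorem pvFwdLoop (A : List Int) (m : Nat) :
    ∀ n : Nat, n ≤ m → n ≤ A.length →
    (List.range n).foldl
      (fun (st : List Int × PySem.Set Int) (k : Nat) =>
        (st.1.set ((k : Int)).toNat (PySem.Set.len st.2),
         PySem.Set.add st.2 (PySem.List.pyGetD A (k : Int) 0)))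
      (List.replicate m 0, PySem.Set.empty)
    = ((List.range n).map (fun k => pvDC (A.take k)) ++ List.replicate (m - n) 0,
       PySem.Set.ofList (A.take n)) := by
  intro n
  induction n with
  | zero => intro _ _; simp [PySem.Set.empty, PySem.Set.ofList]
  | succ n ih =>
      intro hm hA
      rw [List.range_succ]
      simp only [List.foldl_append, List.map_append]
      rw [ih (by omega) (by omega)]
      simp only [List.foldl_cons, List.foldl_nil, Prod.mk.injEq]
      constructor
      · -- the list component
        rw [Int.toNat_natCast]
        have hlen : ((List.range n).map (fun k => pvDC (A.take k))).length = n := by simp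
        have hmn : m - n = (m - (n + 1)) + 1 := by omega
        rw [hmn, List.replicate_succ,
          List.set_append_right _ _ (by omega), hlen, Nat.sub_self]
        simp [pvDC]
      · -- the set component
        have hn : n < A.length := by omega
        have : A.take (n + 1) = A.take n ++ [A.getD n 0] := by
          rw [List.take_add_one]
          simp [List.getElem?_eq_getElem hn, List.getD_eq_getElem?_getD]
        rw [this, PySem.Set.ofList_append_singleton, PySem.List.pyGetD_natCast]

-- A's second loop: s becomes the suffix distinct counts (over A[:n]), built back to front
theorem pvBwdLoop (A : List Int) (n : Nat) (hA : n ≤ A.length) :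
    ∀ j : Nat, j ≤ n →
    ((List.range j).reverse).foldl
      (fun (st : List Int × PySem.Set Int) (k : Nat) =>
        (st.1.set ((k : Int)).toNat (PySem.Set.len st.2),
         PySem.Set.add st.2 (PySem.List.pyGetD A (k : Int) 0)))
      ((List.range n).map (fun i => if j ≤ i then pvDC (((A.take n).drop (i + 1)).reverse) else 0),
       PySem.Set.ofList (((A.take n).drop j).reverse))
    = ((List.range n).map (fun i => pvDC (((A.take n).drop (i + 1)).reverse)),
       PySem.Set.ofList ((A.take n).reverse)) := by
  intro j
  induction j with
  | zero =>
      intro _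
      simp
  | succ j ih =>
      intro hj
      rw [List.range_succ]
      simp only [List.reverse_append, List.reverse_cons, List.reverse_nil,
        List.nil_append, List.cons_append, List.foldl_cons]
      have hdrop : (A.take n).drop j = A.getD j 0 :: (A.take n).drop (j + 1) := by
        have hlt : j < (A.take n).length := by simp; omega
        rw [List.drop_eq_getElem_cons hlt]
        congr 1
        rw [List.getElem_take, List.getD_eq_getElem?_getD,
          List.getElem?_eq_getElem (by omega)]
        simp
      have hset : PySem.Set.add (PySem.Set.ofList (((A.take n).drop (j + 1)).reverse))
            (PySem.List.pyGetD A (j : Int) 0)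
          = PySem.Set.ofList (((A.take n).drop j).reverse) := by
        rw [PySem.List.pyGetD_natCast, hdrop, List.reverse_cons,
          PySem.Set.ofList_append_singleton]
      have hlist : ((List.range n).map
            (fun i => if j + 1 ≤ i then pvDC (((A.take n).drop (i + 1)).reverse) else 0)).set
            ((j : Int)).toNat
            (PySem.Set.len (PySem.Set.ofList (((A.take n).drop (j + 1)).reverse)))
          = (List.range n).map
            (fun i => if j ≤ i then pvDC (((A.take n).drop (i + 1)).reverse) else 0) := by
        rw [Int.toNat_natCast]
        apply List.ext_getElem
        · simp
        · intro i h1 h2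
          have hi : i < n := by simpa using h2
          rw [List.getElem_set]
          by_cases hij : j = i
          · subst hij
            simp [pvDC]
          · rw [if_neg hij]
            simp only [List.getElem_map, List.getElem_range]
            by_cases hle : j ≤ i
            · rw [if_pos (by omega), if_pos hle]
            · rw [if_neg (by omega), if_neg hle]
      rw [hset, hlist]
      exact ih (by omega)

-- A's third loop: filling a fresh list from two index functions
theorem pvFillLoop (p s : List Int) (m : Nat) :
    ∀ n : Nat, n ≤ m →
    (List.range n).foldl
      (fun (a : List Int) (k : Nat) =>
        a.set ((k : Int)).toNat (PySem.List.pyGetD p (k : Int) 0 - PySem.List.pyGetD s (k : Int) 0))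
      (List.replicate m 0)
    = (List.range n).map (fun k => p.getD k 0 - s.getD k 0) ++ List.replicate (m - n) 0 := by
  intro n
  induction n with
  | zero => simp
  | succ n ih =>
      intro hm
      rw [List.range_succ]
      simp only [List.foldl_append, List.map_append]
      rw [ih (by omega)]
      simp only [List.foldl_cons, List.foldl_nil]
      rw [Int.toNat_natCast]
      have hlen : ((List.range n).map (fun k => p.getD k 0 - s.getD k 0)).length = n := by simp
      have hmn : m - n = (m - (n + 1)) + 1 := by omega
      rw [hmn, List.replicate_succ,
        List.set_append_right _ _ (by omega), hlen, Nat.sub_self]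
      simp [PySem.List.pyGetD_natCast]

-- ===== VERDICT (by name: the statement is the Claim_ definition above) =====
theorem getDistinctDifference_spec : Claim_equal_getDistinctDifference := by
  intro N A _ hpre
  unfold Pre_getDistinctDifference at hpre
  unfold Spec_getDistinctDifference getDistinctDifference getDistinctDifference_alt
  by_cases hN : 0 ≤ N
  · -- N = ↑n with n ≤ A.length
    obtain ⟨n, rfl⟩ : ∃ n : Nat, N = (n : Int) := ⟨N.toNat, (Int.toNat_of_nonneg hN).symm⟩
    have hA : n ≤ A.length := by exact_mod_cast hpre
    simp only [Int.toNat_natCast]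
    rw [PySem.List.pyRange_zero_natCast, pvRevRange n, ← List.map_reverse]
    simp only [List.foldl_map]
    rw [pvFwdLoop A n n (le_refl n) hA]
    have hbwd := pvBwdLoop A n hA n (le_refl n)
    have hinit : ((List.range n).map
          (fun i => if n ≤ i then pvDC (((A.take n).drop (i + 1)).reverse) else 0))
        = List.replicate n (0 : Int) := by
      apply List.ext_getElem
      · simp
      · intro i h1 h2
        have : i < n := by simpa using h1
        simp [if_neg (by omega : ¬ n ≤ i)]
    have hinit2 : (A.take n).drop n = [] := by
      apply List.drop_eq_nil_of_le; simp
    rw [hinit, hinit2] at hbwd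
    simp only [List.reverse_nil,
      show PySem.Set.ofList ([] : List Int) = PySem.Set.empty from rfl] at hbwd
    rw [hbwd]
    simp only [Nat.sub_self, List.replicate_zero, List.append_nil]
    rw [pvFillLoop _ _ n n (le_refl n), Nat.sub_self, List.replicate_zero,
      List.append_nil]
    apply List.ext_getElem
    · simp
    · intro i h1 h2
      have hi : i < n := by simpa using h1
      simp only [List.getElem_map, List.getElem_range, List.getD_eq_getElem?_getD,
        List.getElem?_map, List.getElem?_range hi, Option.map_some, Option.getD_some]
      have hs1 : PySem.List.slice A none (some (i : Int)) = A.take i := by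
        rw [PySem.List.slice_to A (by positivity)]; simp
      have hs2 : PySem.List.slice A (some ((i : Int) + 1)) (some (n : Int))
          = List.take (n - (i + 1)) (List.drop (i + 1) A) := by
        have h : ((i : Int) + 1) = ((i + 1 : Nat) : Int) := by push_cast; ring
        rw [h, PySem.List.slice_natCast]
      rw [hs1, hs2]
      have hsuffix : pvDC (((A.take n).drop (i + 1)).reverse)
          = pvDC (List.take (n - (i + 1)) (List.drop (i + 1) A)) := by
        rw [List.drop_take]
        exact pvDC_congr _ _ (fun x => by simp)
      rw [hsuffix]
      rfl
  · -- N < 0: every loop runs over the empty range, both sides are []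
    have hnil : PySem.List.pyRange 0 N 1 = [] :=
      PySem.List.pyRange_one_eq_nil (by omega)
    have hto : N.toNat = 0 := by omega
    rw [hnil, hto]
    simp
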